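-- pv_equiv track=rewrite | github.com/ShalekLab/tcrgo | tcrgo/bio.py | get_frame_max
-- ===== SOURCE A (Python) =====
-- from typing import List, Optional, Tuple, Dict, Set, Any
--
-- def get_frame_max(frames: Tuple[Tuple[Any, ...], ...]) -> Set[int]:
-- 	frames_max = set()
-- 	count_max=0
-- 	for i in range(len(frames)):
-- 		count = len(frames[i])
-- 		if count > count_max:
-- 			count_max = count
-- 			frames_max = set([i])
-- 		elif count == count_max:
-- 			frames_max.add(i)
-- 	return frames_max
-- ===== SOURCE B (Python) =====
-- def get_frame_max(frames):
--     count_max = max((len(f) for f in frames), default=0)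
--     return {i for i, f in enumerate(frames) if len(f) == count_max}
-- ===== Notes on version B (the rewrite author's own statement) =====
-- stated objective: simpler
-- what changed: Replaces A's single fused scan that maintains a running max and rebuilds the index set on each new maximum with a two-pass reduce-then-filter decomposition: compute the max length (default 0), then collect all indices attaining it.
import Mathlib
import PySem

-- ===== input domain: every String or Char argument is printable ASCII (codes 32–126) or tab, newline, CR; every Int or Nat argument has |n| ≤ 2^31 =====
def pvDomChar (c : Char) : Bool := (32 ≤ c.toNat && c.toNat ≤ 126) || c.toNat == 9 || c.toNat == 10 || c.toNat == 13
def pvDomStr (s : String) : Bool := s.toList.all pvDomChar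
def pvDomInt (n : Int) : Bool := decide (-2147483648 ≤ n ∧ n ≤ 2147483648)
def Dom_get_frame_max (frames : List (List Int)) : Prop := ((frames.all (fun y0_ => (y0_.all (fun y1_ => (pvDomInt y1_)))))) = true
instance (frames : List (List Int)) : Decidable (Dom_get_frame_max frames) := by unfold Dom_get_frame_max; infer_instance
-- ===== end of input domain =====

-- B replaces A's fused running-max scan with a two-pass max-then-filter decomposition; return values proved equal.

-- ===== PORT A =====
-- loop body of A: update (frames_max, count_max) for index i
def gfmStep (frames : List (List Int)) (st : PySem.Set Int × Int) (i : Int) : PySem.Set Int × Int :=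
  let count : Int := (PySem.List.pyGetD frames i []).length
  if count > st.2 then (PySem.Set.ofList [i], count)
  else if count = st.2 then (PySem.Set.add st.1 i, st.2)
  else st

def get_frame_max (frames : List (List Int)) : List Int :=
  ((PySem.List.pyRange 0 (frames.length : Int) 1).foldl (gfmStep frames) (PySem.Set.empty, 0)).1

-- ===== PORT B =====
def get_frame_max_alt (frames : List (List Int)) : List Int :=
  let count_max : Int := (PySem.List.max? (frames.map (fun f => (f.length : Int))) (fun x => x)).getD 0
  PySem.Set.ofList
    (((PySem.List.enumerate frames 0).filter (fun p => decide ((p.2.length : Int) = count_max))).map (·.1))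

-- ===== PRECONDITION & SPEC =====
def Spec_get_frame_max (frames : List (List Int)) (out : List Int) : Prop := out = get_frame_max_alt frames
instance (frames : List (List Int)) (out : List Int) : Decidable (Spec_get_frame_max frames out) := by unfold Spec_get_frame_max; infer_instance

-- ===== CLAIM (what is proved, stated in full; the proofs are below) =====
def Claim_equal_get_frame_max : Prop := ∀ (frames : List (List Int)), Dom_get_frame_max frames → Spec_get_frame_max frames (get_frame_max frames)

-- ===== LEMMAS AND PROOFS =====

-- A's loop over range(len(frames)) with frames[i] is the loop over enumerate(frames)
theorem gfm_fold_enum (frames : List (List Int)) :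
    (PySem.List.pyRange 0 (frames.length : Int) 1).foldl (gfmStep frames) (PySem.Set.empty, 0)
      = (PySem.List.enumerate frames 0).foldl
          (fun st p => gfmStep frames st p.1) (PySem.Set.empty, 0) := by
  rw [PySem.List.enumerate_eq_map_pyRange (xs := frames) (d := ([] : List Int)), List.foldl_map]
  rfl

-- loop invariant: the fold computes the running max M and the indices attaining it,
-- with the carried set S kept only when no element beats m; S's elements are below the start index s.
theorem gfm_loop (frames : List (List Int)) (xs : List (List Int)) (s : Int) (S : List Int) (m : Int)
    (hS : ∀ j ∈ S, j < s)
    (hidx : ∀ k : Nat, k < xs.length → PySem.List.pyGetD frames (s + k) [] = xs[k]!) :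
    (PySem.List.enumerate xs s).foldl (fun st p => gfmStep frames st p.1) (S, m)
      = ((if xs.foldl (fun acc f => max acc (f.length : Int)) m = m then S else []) ++
          ((PySem.List.enumerate xs s).filter
            (fun p => decide ((p.2.length : Int) = xs.foldl (fun acc f => max acc (f.length : Int)) m))).map (·.1),
         xs.foldl (fun acc f => max acc (f.length : Int)) m) := by
  induction xs generalizing s S m with
  | nil => simp [PySem.List.enumerate_nil]
  | cons f t ih =>
    have h0 : PySem.List.pyGetD frames s [] = f := by
      have := hidx 0 (by simp)
      simpa using this
    have hidx' : ∀ k : Nat, k < t.length → PySem.List.pyGetD frames (s + 1 + k) [] = t[k]! := by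
      intro k hk
      have := hidx (k + 1) (by simp; omega)
      have h1 : s + ((k : Int) + 1) = s + 1 + k := by ring
      simpa [h1, getElem!_pos, List.getElem_cons_succ] using this
    have hMt := PySem.List.le_foldl_max_int t (fun f => (f.length : Int))
    rw [PySem.List.enumerate_cons]
    simp only [List.foldl_cons]
    by_cases hgt : ((f.length : Int)) > m
    · -- count > count_max : reset
      have hstep : gfmStep frames (S, m) s = (([s] : List Int), (f.length : Int)) := by
        simp [gfmStep, h0, hgt, PySem.Set.ofList, PySem.Set.add, PySem.Set.empty]
      rw [hstep]
      have hmf : max m ((f.length : Int)) = (f.length : Int) := by omega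
      simp only [hmf]
      rw [ih (s + 1) [s] ((f.length : Int)) (by intro j hj; simp at hj; omega) hidx']
      have hM : (f.length : Int) ≤ t.foldl (fun acc g => max acc (g.length : Int)) ((f.length : Int)) :=
        (hMt ((f.length : Int))).1
      rw [List.filter_cons]
      rw [if_neg (by omega : ¬ t.foldl (fun acc g => max acc (g.length : Int)) ((f.length : Int)) = m)]
      by_cases heq : t.foldl (fun acc g => max acc (g.length : Int)) ((f.length : Int)) = (f.length : Int)
      · simp [heq]
      · have : ¬ ((f.length : Int) = t.foldl (fun acc g => max acc (g.length : Int)) ((f.length : Int))) := by omega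
        simp [heq, this]
    · by_cases heqm : ((f.length : Int)) = m
      · -- count == count_max : add index
        have hnot : s ∉ S := fun h => absurd (hS s h) (by omega)
        have hstep : gfmStep frames (S, m) s = (S ++ [s], m) := by
          simp only [gfmStep, h0]
          rw [if_neg (by omega), if_pos heqm]
          simp [PySem.Set.add, hnot]
        rw [hstep]
        have hmf : max m ((f.length : Int)) = m := by omega
        simp only [hmf]
        have hS' : ∀ j ∈ S ++ [s], j < s + 1 := by
          intro j hj
          rcases List.mem_append.mp hj with h | h
          · exact lt_trans (hS j h) (by omega)
          · simp at h; omega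
        rw [ih (s + 1) (S ++ [s]) m hS' hidx']
        have hM : m ≤ t.foldl (fun acc g => max acc (g.length : Int)) m := (hMt m).1
        rw [List.filter_cons]
        by_cases heq : t.foldl (fun acc g => max acc (g.length : Int)) m = m
        · simp [heq, heqm]
        · have hne : ¬ (((f.length : Int)) = t.foldl (fun acc g => max acc (g.length : Int)) m) := by omega
          simp [heq, hne]
      · -- count < count_max : skip
        have hstep : gfmStep frames (S, m) s = (S, m) := by
          simp [gfmStep, h0, if_neg (by omega : ¬ ((f.length : Int)) > m), heqm]
        rw [hstep]
        have hmf : max m ((f.length : Int)) = m := by omega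
        simp only [hmf]
        rw [ih (s + 1) S m (fun j hj => lt_trans (hS j hj) (by omega)) hidx']
        have hM : m ≤ t.foldl (fun acc g => max acc (g.length : Int)) m := (hMt m).1
        have hne : ¬ (((f.length : Int)) = t.foldl (fun acc g => max acc (g.length : Int)) m) := by omega
        rw [List.filter_cons]
        simp [hne]

-- B's count_max is the running max over lengths starting at 0
theorem gfm_max_eq (frames : List (List Int)) :
    (PySem.List.max? (frames.map (fun f => (f.length : Int))) (fun x => x)).getD 0
      = frames.foldl (fun acc f => max acc (f.length : Int)) 0 := by
  cases frames with
  | nil => simp [PySem.List.max?]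
  | cons f t =>
    rw [List.map_cons, PySem.List.max?_id_cons]
    simp only [Option.getD_some, List.foldl_cons, List.foldl_map]
    have h0 : max 0 ((f.length : Int)) = (f.length : Int) := by
      have : (0 : Int) ≤ (f.length : Int) := Int.natCast_nonneg _
      omega
    rw [h0]

-- filtered enumerate indices are distinct
theorem gfm_nodup (frames : List (List Int)) (c : Int) :
    (((PySem.List.enumerate frames 0).filter (fun p => decide ((p.2.length : Int) = c))).map (·.1)).Nodup := by
  have h := PySem.List.pairwise_lt_enumerate frames (0 : Int)
  have h2 := List.Pairwise.filter (fun p => decide ((p.2.length : Int) = c)) h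
  have h3 := List.Pairwise.map (f := fun p : Int × List Int => p.1)
    (fun a b hab => hab) h2
  exact List.Pairwise.imp (fun hab => ne_of_lt hab) h3

theorem gfm_alt_eq (frames : List (List Int)) :
    get_frame_max_alt frames
      = PySem.Set.ofList
          (((PySem.List.enumerate frames 0).filter
            (fun p => decide ((p.2.length : Int) = frames.foldl (fun acc f => max acc (f.length : Int)) 0))).map (·.1)) := by
  simp only [get_frame_max_alt, gfm_max_eq]

-- ===== VERDICT (by name: the statement is the Claim_ definition above) =====
theorem get_frame_max_spec : Claim_equal_get_frame_max := by
  intro frames _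
  unfold Spec_get_frame_max get_frame_max
  rw [gfm_fold_enum]
  have he : (PySem.Set.empty, (0 : Int)) = (([] : List Int), (0 : Int)) := rfl
  rw [he]
  rw [gfm_loop frames frames 0 [] 0 (by simp)
      (by intro k hk; simp [getElem!_pos, hk, PySem.List.pyGetD_natCast])]
  rw [gfm_alt_eq,
    PySem.Set.ofList_eq_self_of_nodup _
      (gfm_nodup frames (frames.foldl (fun acc f => max acc (f.length : Int)) 0))]
  simp
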